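-- pv_equiv track=rewrite | github.com/vika090/python_mipt_dafe_tasks | solutions/sem01/lesson02/task4.py | get_multiplications_amount
-- ===== SOURCE A (Python) =====
-- def get_multiplications_amount(num: int) -> int:
--     multiplications_amount = 0
--     # ваш код
--     while num >1:
--         if num%2 ==0:
--             multiplications_amount +=1
--             num = num //2
--         else:
--             multiplications_amount +=1
--             num = num-1
--     return multiplications_amount
-- ===== SOURCE B (Python) =====
-- def get_multiplications_amount(num: int) -> int:
--     # closed form: halvings = bit_length-1, decrements = popcount-1 (for num > 1)
--     if num <= 1:
--         return 0
--     return num.bit_length() + bin(num).count('1') - 2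
-- ===== Notes on version B (the rewrite author's own statement) =====
-- stated objective: simpler
-- what changed: Replaces the step-by-step halve/decrement loop with a closed form from the binary representation: bit_length(num)-1 halvings plus popcount(num)-1 decrements, and 0 when the loop body never runs (num <= 1, where both return 0).
import Mathlib
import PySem

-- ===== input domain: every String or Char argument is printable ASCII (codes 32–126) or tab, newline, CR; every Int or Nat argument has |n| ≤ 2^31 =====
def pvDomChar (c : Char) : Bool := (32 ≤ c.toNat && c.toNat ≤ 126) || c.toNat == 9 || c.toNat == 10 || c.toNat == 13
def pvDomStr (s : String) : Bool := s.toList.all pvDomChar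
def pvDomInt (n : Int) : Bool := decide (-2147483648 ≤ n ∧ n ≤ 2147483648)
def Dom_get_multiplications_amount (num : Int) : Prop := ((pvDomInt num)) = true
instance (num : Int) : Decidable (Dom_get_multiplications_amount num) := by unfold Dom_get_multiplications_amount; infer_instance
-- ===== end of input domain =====

-- B replaces A's halve/decrement loop by a closed form from num's binary representation (bit_length + popcount); proved equal for all Int.


-- ===== PORT A =====
-- while num > 1: … ; each iteration adds 1 and either halves (even) or decrements (odd)
def get_multiplications_amount (num : Int) : Int :=
  if h : num > 1 then
    if PySem.Int.mod num 2 = 0 then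
      1 + get_multiplications_amount (PySem.Int.floordiv num 2)
    else
      1 + get_multiplications_amount (num - 1)
  else 0
termination_by num.toNat
decreasing_by
  · have h2 : PySem.Int.floordiv num 2 = num / 2 := PySem.Int.floordiv_eq_ediv_of_pos (by omega)
    rw [h2]; omega
  · omega

-- ===== PORT B =====
-- num.bit_length() → PySem.Int.bitLength; bin(num).count('1') → PySem.Int.bitCount (exact for num > 1)
def get_multiplications_amount_alt (num : Int) : Int :=
  if num ≤ 1 then 0
  else (PySem.Int.bitLength num : Int) + (PySem.Int.bitCount num : Int) - 2

-- ===== PRECONDITION & SPEC =====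
def Spec_get_multiplications_amount (num : Int) (out : Int) : Prop := out = get_multiplications_amount_alt num
instance (num : Int) (out : Int) : Decidable (Spec_get_multiplications_amount num out) := by unfold Spec_get_multiplications_amount; infer_instance

-- ===== CLAIM (what is proved, stated in full; the proofs are below) =====
def Claim_equal_get_multiplications_amount : Prop := ∀ (num : Int), Dom_get_multiplications_amount num → Spec_get_multiplications_amount num (get_multiplications_amount num)

-- ===== LEMMAS AND PROOFS =====

lemma gma_closed_form (k : Nat) : ∀ (n : Int), n.toNat ≤ k → 1 < n →
    get_multiplications_amount n = (PySem.Int.bitLength n : Int) + (PySem.Int.bitCount n : Int) - 2 := by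
  induction k with
  | zero => intro n hk hn; omega
  | succ k ih =>
    intro n hk hn
    have hpos : 0 < n := by omega
    have hfd : PySem.Int.floordiv n 2 = n / 2 := PySem.Int.floordiv_eq_ediv_of_pos (by omega)
    have hmd : PySem.Int.mod n 2 = n % 2 := PySem.Int.mod_eq_emod_of_pos (by omega)
    have hBL := PySem.Int.bitLength_of_pos (n := n) hpos
    have hBC := PySem.Int.bitCount_of_pos (n := n) hpos
    rw [get_multiplications_amount]
    simp only [hn, dif_pos]
    by_cases he : PySem.Int.mod n 2 = 0
    · rw [if_pos he, hfd]
      by_cases h2 : 1 < n / 2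
      · have he2 : n % 2 = 0 := by rw [← hmd]; exact he
        rw [ih (n / 2) (by omega) h2]
        rw [hBL, hBC, hfd, hmd]
        push_cast
        omega
      · -- n even with n/2 ≤ 1 and n > 1 forces n = 2
        have hn2 : n = 2 := by omega
        subst hn2
        have h1 : get_multiplications_amount 1 = 0 := by rw [get_multiplications_amount]; norm_num
        norm_num [h1]
        decide
    · -- n odd, n ≥ 3, recurse on n - 1 (even, ≥ 2)
      rw [if_neg he]
      have hodd : n % 2 = 1 := by omega
      have h3 : 3 ≤ n := by omega
      rw [ih (n - 1) (by omega) (by omega)]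
      have hpos' : (0:Int) < n - 1 := by omega
      have hBL' := PySem.Int.bitLength_of_pos (n := n - 1) hpos'
      have hBC' := PySem.Int.bitCount_of_pos (n := n - 1) hpos'
      have hfd' : PySem.Int.floordiv (n - 1) 2 = (n - 1) / 2 := PySem.Int.floordiv_eq_ediv_of_pos (by omega)
      have hmd' : PySem.Int.mod (n - 1) 2 = (n - 1) % 2 := PySem.Int.mod_eq_emod_of_pos (by omega)
      have hsame : (n - 1) / 2 = n / 2 := by omega
      rw [hBL, hBC, hBL', hBC', hfd, hfd', hmd, hmd', hsame]
      push_cast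
      omega

-- ===== VERDICT (by name: the statement is the Claim_ definition above) =====
theorem get_multiplications_amount_spec : Claim_equal_get_multiplications_amount := by
  intro num _
  unfold Spec_get_multiplications_amount get_multiplications_amount_alt
  by_cases h : num ≤ 1
  · rw [get_multiplications_amount]
    simp [h, show ¬ num > 1 by omega]
  · rw [if_neg h]
    exact gma_closed_form num.toNat num le_rfl (by omega)
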